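-- pv_equiv track=rewrite | github.com/GundalaNikhil/DSA | dsa-problems/StringsClassic/solutions/python/STC-015-aho-corasick-cooldown-scoring.py | solve_counting
-- ===== SOURCE A (Python) =====
-- import collections
--
-- class Node:
--     def __init__(self):
--         self.children = {}
--         self.fail = None
--         self.output = None
--         self.patterns = [] # List of (len, weight) for Cooldown / List of indices/counts for Counting
--
-- def build_aho_corasick(patterns, weights=None):
--     root = Node()
--     for i, p in enumerate(patterns):
--         curr = root
--         for char in p:
--             if char not in curr.children:
--                 curr.children[char] = Node()
--             curr = curr.children[char]
--         w = weights[i] if weights else 1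
--         curr.patterns.append((len(p), w))
--
--     queue = collections.deque()
--     for char, node in root.children.items():
--         node.fail = root
--         queue.append(node)
--
--     while queue:
--         curr = queue.popleft()
--         if curr.fail.patterns:
--             curr.output = curr.fail
--         else:
--             curr.output = curr.fail.output
--
--         for char_code in range(ord('a'), ord('z') + 1):
--             char = chr(char_code)
--             if char in curr.children:
--                 child = curr.children[char]
--                 child.fail = curr.fail.children.get(char, root)
--                 queue.append(child)
--             else:
--                 curr.children[char] = curr.fail.children.get(char, root)
--
--     return root
--
-- def solve_counting(text, patterns):
--     root = build_aho_corasick(patterns)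
--     curr = root
--     count = 0
--
--     for char in text:
--         curr = curr.children.get(char, root)
--
--         # Sum matches at this position
--         temp = curr
--         while temp != root and temp is not None:
--             count += len(temp.patterns)
--             temp = temp.output
--
--     return count
-- ===== SOURCE B (Python) =====
-- import collections
--
-- def solve_counting(text, patterns):
--     # Flat-array Aho-Corasick with the per-node match count accumulated along the
--     # fail chain during the BFS, so the text scan is O(1) per character (no
--     # suffix-chain walk per position).
--     children = [dict()]        # node id -> {char: node id}; goto edges added in BFS
--     cnt = [0]                  # node id -> patterns ending at node (cumulated after BFS)
--     for p in patterns: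
--         u = 0
--         for ch in p:
--             v = children[u].get(ch)
--             if v is None:
--                 children.append(dict())
--                 cnt.append(0)
--                 v = len(children) - 1
--                 children[u][ch] = v
--             u = v
--         if p:
--             cnt[u] += 1
--     fail = [0] * len(children)
--     queue = collections.deque(children[0].values())
--     while queue:
--         u = queue.popleft()
--         cnt[u] += cnt[fail[u]]
--         for code in range(97, 123):
--             ch = chr(code)
--             v = children[u].get(ch)
--             if v is None:
--                 children[u][ch] = children[fail[u]].get(ch, 0)
--             else:
--                 fail[v] = children[fail[u]].get(ch, 0)
--                 queue.append(v)
--     total = 0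
--     u = 0
--     for ch in text:
--         u = children[u].get(ch, 0)
--         total += cnt[u]
--     return total
-- ===== Notes on version B (the rewrite author's own statement) =====
-- stated objective: alternative
-- what changed: B replaces A's per-character suffix-chain walk (following output links and summing pattern lists at every text position) by match counts accumulated once along fail links during the BFS over a flat-array automaton, so the text scan does constant work per character.
import Mathlib
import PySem

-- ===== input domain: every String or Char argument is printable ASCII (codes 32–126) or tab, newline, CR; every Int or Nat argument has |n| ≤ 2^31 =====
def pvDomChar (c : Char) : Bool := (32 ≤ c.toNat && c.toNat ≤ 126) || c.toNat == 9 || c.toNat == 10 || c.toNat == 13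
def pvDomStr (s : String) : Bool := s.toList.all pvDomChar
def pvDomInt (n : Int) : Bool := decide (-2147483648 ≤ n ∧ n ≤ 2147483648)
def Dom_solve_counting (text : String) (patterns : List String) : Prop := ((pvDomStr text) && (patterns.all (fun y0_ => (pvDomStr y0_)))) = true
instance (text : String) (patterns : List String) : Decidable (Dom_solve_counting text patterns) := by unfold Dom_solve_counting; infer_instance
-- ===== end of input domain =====

-- B accumulates each node's match count along fail links once during the BFS (flat arrays,
-- no output links), replacing A's per-character suffix-chain walk by one array lookup per character.

-- ===== PORT A =====
structure NodeA where
  children : PySem.Dict Char Nat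
  fail : Option Nat
  output : Option Nat
  patterns : List (Int × Int)
deriving Repr, DecidableEq

def defA : NodeA := ⟨PySem.Dict.empty, none, none, []⟩

-- Python Node objects become ids into a list; object identity = id equality (each Node() is fresh)
def getA (ns : List NodeA) (u : Nat) : NodeA := ns.getD u defA

-- chars of `range(ord('a'), ord('z')+1)`
def azChars : List Char := (PySem.List.pyRange 97 123 1).map (fun i => Char.ofNat i.toNat)

-- one step of `for char in p:` in build_aho_corasick
def trieStepA : List NodeA × Nat → Char → List NodeA × Nat
  | (ns, u), c =>
    match (getA ns u).children.get? c with
    | some v => (ns, v)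
    | none =>
      let v := ns.length
      (( ns ++ [defA]).set u { getA ns u with children := (getA ns u).children.insert c v }, v)

-- one pattern insertion, then `curr.patterns.append((len(p), w))` with w = 1 (weights is None)
def insPatA (ns : List NodeA) (p : List Char) : List NodeA :=
  let r := p.foldl trieStepA (ns, 0)
  r.1.set r.2 { getA r.1 r.2 with patterns := (getA r.1 r.2).patterns ++ [((p.length : Int), 1)] }

def buildTrieA (patterns : List String) : List NodeA :=
  patterns.foldl (fun ns p => insPatA ns p.toList) [defA]

-- `for char, node in root.children.items(): node.fail = root; queue.append(node)`
def initA (ns : List NodeA) : List NodeA × List Nat :=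
  (getA ns 0).children.items.foldl
    (fun st p => (st.1.set p.2 { getA st.1 p.2 with fail := some 0 }, st.2 ++ [p.2])) (ns, [])

-- the BFS body's `for char_code in range(...)` loop, for dequeued node u
def procCharsA (u : Nat) : List NodeA × List Nat → List Char → List NodeA × List Nat
  | (ns, q), [] => (ns, q)
  | (ns, q), c :: cs =>
    -- curr.fail is set (to some _) for every dequeued node; Python would raise otherwise
    let fu := ((getA ns u).fail).getD 0
    match (getA ns u).children.get? c with
    | some v =>
      procCharsA u
        (ns.set v { getA ns v with fail := some ((getA ns fu).children.getD c 0) }, q ++ [v]) cs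
    | none =>
      procCharsA u
        (ns.set u { getA ns u with children :=
            (getA ns u).children.insert c ((getA ns fu).children.getD c 0) }, q) cs

-- `while queue:` — every node is enqueued at most once, so fuel = number of nodes suffices
def bfsA : Nat → List Nat → List NodeA → List NodeA
  | 0, _, ns => ns
  | _ + 1, [], ns => ns
  | fuel + 1, u :: q, ns =>
    let fu := ((getA ns u).fail).getD 0
    let out := if (getA ns fu).patterns ≠ [] then some fu else (getA ns fu).output
    let r := procCharsA u (ns.set u { getA ns u with output := out }, q) azChars
    bfsA fuel r.2 r.1

-- `temp = curr; while temp != root and temp is not None:` — the output chain visits distinct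
-- nodes, so fuel = number of nodes + 1 suffices
def chainA (ns : List NodeA) : Nat → Option Nat → Int → Int
  | 0, _, acc => acc
  | _, none, acc => acc
  | fuel + 1, some t, acc =>
    if t = 0 then acc
    else chainA ns fuel (getA ns t).output (acc + ((getA ns t).patterns.length : Int))

def solve_counting (text : String) (patterns : List String) : Int :=
  let t := buildTrieA patterns
  let r := initA t
  let ns := bfsA r.1.length r.2 r.1
  (text.toList.foldl
    (fun (st : Nat × Int) c =>
      let u := (getA ns st.1).children.getD c 0
      (u, st.2 + chainA ns (ns.length + 1) (some u) 0)) (0, 0)).2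

-- ===== PORT B =====
-- flat state: children maps, per-node counts, fail links (0-initialised as in Source B)
def getC (cb : List (PySem.Dict Char Nat)) (u : Nat) : PySem.Dict Char Nat :=
  cb.getD u PySem.Dict.empty

-- `for ch in p:` of Source B
def trieStepB : (List (PySem.Dict Char Nat) × List Int) × Nat → Char →
    (List (PySem.Dict Char Nat) × List Int) × Nat
  | ((cb, cnt), u), c =>
    match (getC cb u).get? c with
    | some v => ((cb, cnt), v)
    | none =>
      let v := cb.length
      (((cb ++ [PySem.Dict.empty]).set u ((getC cb u).insert c v), cnt ++ [0]), v)

def insPatB (cb : List (PySem.Dict Char Nat)) (cnt : List Int) (p : List Char) :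
    List (PySem.Dict Char Nat) × List Int :=
  let r := p.foldl trieStepB ((cb, cnt), 0)
  if p ≠ [] then (r.1.1, r.1.2.set r.2 (r.1.2.getD r.2 0 + 1)) else r.1

def buildTrieB (patterns : List String) : List (PySem.Dict Char Nat) × List Int :=
  patterns.foldl (fun st p => insPatB st.1 st.2 p.toList) ([PySem.Dict.empty], [0])

-- the BFS body's `for code in range(97, 123)` loop of Source B
def procCharsB (u : Nat) :
    List (PySem.Dict Char Nat) × List Nat × List Nat → List Char →
    List (PySem.Dict Char Nat) × List Nat × List Nat
  | (cb, fb, q), [] => (cb, fb, q)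
  | (cb, fb, q), c :: cs =>
    let fu := fb.getD u 0
    match (getC cb u).get? c with
    | some v =>
      procCharsB u (cb, fb.set v ((getC cb fu).getD c 0), q ++ [v]) cs
    | none =>
      procCharsB u (cb.set u ((getC cb u).insert c ((getC cb fu).getD c 0)), fb, q) cs

def bfsB : Nat → List Nat → List (PySem.Dict Char Nat) × List Int × List Nat →
    List (PySem.Dict Char Nat) × List Int
  | 0, _, st => (st.1, st.2.1)
  | _ + 1, [], st => (st.1, st.2.1)
  | fuel + 1, u :: q, (cb, cnt, fb) =>
    let cnt' := cnt.set u (cnt.getD u 0 + cnt.getD (fb.getD u 0) 0)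
    let r := procCharsB u (cb, fb, q) azChars
    bfsB fuel r.2.2 (r.1, cnt', r.2.1)

def solve_counting_alt (text : String) (patterns : List String) : Int :=
  let t := buildTrieB patterns
  let r := bfsB t.1.length ((getC t.1 0).values) (t.1, t.2, List.replicate t.1.length 0)
  (text.toList.foldl
    (fun (st : Nat × Int) c =>
      let u := (getC r.1 st.1).getD c 0
      (u, st.2 + r.2.getD u 0)) (0, 0)).2

-- ===== PRECONDITION & SPEC =====
def Spec_solve_counting (text : String) (patterns : List String) (out : Int) : Prop := out = solve_counting_alt text patterns
instance (text : String) (patterns : List String) (out : Int) : Decidable (Spec_solve_counting text patterns out) := by unfold Spec_solve_counting; infer_instance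

-- ===== CLAIM (what is proved, stated in full; the proofs are below) =====
def Claim_equal_solve_counting : Prop := ∀ (text : String) (patterns : List String), Dom_solve_counting text patterns → Spec_solve_counting text patterns (solve_counting text patterns)

-- ===== LEMMAS AND PROOFS =====


-- generic list-getD helpers
theorem gsetD_self {α : Type} (l : List α) (u : Nat) (x d : α) (h : u < l.length) :
    (l.set u x).getD u d = x := by simp [List.getD, h]

theorem gsetD_ne {α : Type} (l : List α) (u w : Nat) (x d : α) (h : w ≠ u) :
    (l.set u x).getD w d = l.getD w d := by
  simp [List.getD, List.getElem?_set_ne (id (Ne.symm h))]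

theorem gappD_lt {α : Type} (l : List α) (x d : α) (w : Nat) (h : w < l.length) :
    (l ++ [x]).getD w d = l.getD w d := by simp [List.getD, List.getElem?_append_left h]

theorem gappD_self {α : Type} (l : List α) (x d : α) : (l ++ [x]).getD l.length d = x := by
  simp [List.getD]

theorem gappD_gt {α : Type} (l : List α) (x d : α) (w : Nat) (h : l.length < w) :
    (l ++ [x]).getD w d = d := by
  have : (l ++ [x]).length ≤ w := by simp; omega
  simp [List.getD, List.getElem?_eq_none this]

theorem gD_ge {α : Type} (l : List α) (d : α) (w : Nat) (h : l.length ≤ w) :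
    l.getD w d = d := by simp [List.getD, List.getElem?_eq_none h]

theorem getA_set_self (ns : List NodeA) (u : Nat) (x : NodeA) (h : u < ns.length) :
    getA (ns.set u x) u = x := gsetD_self ns u x defA h

theorem getA_set_ne (ns : List NodeA) (u w : Nat) (x : NodeA) (h : w ≠ u) :
    getA (ns.set u x) w = getA ns w := gsetD_ne ns u w x defA h

theorem nodup_len_le (P : List Nat) (n : Nat) (h : P.Nodup) (h2 : ∀ u ∈ P, 0 < u ∧ u < n)
    (hn : 0 < n) : P.length + 1 ≤ n := by
  have h3 : P.toFinset ⊆ Finset.Ico 1 n := by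
    intro x hx; simp only [List.mem_toFinset] at hx
    have := h2 x hx; simp only [Finset.mem_Ico]; omega
  have := Finset.card_le_card h3
  rw [List.toFinset_card_of_nodup h] at this
  simp only [Nat.card_Ico] at this
  omega

-- ===== trie-build phase invariant =====
structure TrieInv (ns : List NodeA) (cb : List (PySem.Dict Char Nat)) (cnt : List Int) : Prop where
  hlen₁ : cb.length = ns.length
  hlen₂ : cnt.length = ns.length
  hpos : 0 < ns.length
  hch : ∀ u, (getA ns u).children = getC cb u
  hfail : ∀ u, (getA ns u).fail = none
  hout : ∀ u, (getA ns u).output = none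
  hcnt0 : cnt.getD 0 0 = 0
  hcnt : ∀ u, 0 < u → cnt.getD u 0 = ((getA ns u).patterns.length : Int)
  hedge : ∀ u c v, (getA ns u).children.get? c = some v → u < v ∧ v < ns.length
  hinj : ∀ u c u' c' v, (getA ns u).children.get? c = some v →
      (getA ns u').children.get? c' = some v → u = u' ∧ c = c'
  hkeys : ∀ u, (getA ns u).children.keys.Nodup

theorem trieStep_inv (ns : List NodeA) (cb : List (PySem.Dict Char Nat)) (cnt : List Int)
    (u : Nat) (c : Char) (hI : TrieInv ns cb cnt) (hu : u < ns.length) :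
    TrieInv (trieStepA (ns, u) c).1 (trieStepB ((cb, cnt), u) c).1.1
      (trieStepB ((cb, cnt), u) c).1.2 ∧
    (trieStepA (ns, u) c).2 = (trieStepB ((cb, cnt), u) c).2 ∧
    (trieStepA (ns, u) c).2 < (trieStepA (ns, u) c).1.length ∧
    u < (trieStepA (ns, u) c).2 := by
  have hmapeq : (getA ns u).children = getC cb u := hI.hch u
  cases hget : (getA ns u).children.get? c with
  | some v =>
    have hB : (getC cb u).get? c = some v := by rw [← hmapeq]; exact hget
    have hev := hI.hedge u c v hget
    simp only [trieStepA, trieStepB, hget, hB]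
    refine ⟨hI, ?_, ?_, ?_⟩ <;> simp [hev.1, hev.2]
  | none =>
    have hB : (getC cb u).get? c = none := by rw [← hmapeq]; exact hget
    simp only [trieStepA, trieStepB, hget, hB]
    set n := ns.length with hn
    have hnb : cb.length = n := hI.hlen₁
    have hgA : ∀ w, getA ((ns ++ [defA]).set u
        { getA ns u with children := (getA ns u).children.insert c n }) w =
        if w = u then { getA ns u with children := (getA ns u).children.insert c n }
        else if w = n then defA else getA ns w := by
      intro w
      by_cases hw : w = u
      · subst hw
        rw [if_pos rfl, getA_set_self]
        simp only [List.length_append, List.length_cons]; omega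
      · rw [if_neg hw, getA_set_ne _ _ _ _ hw]
        by_cases hwn : w = n
        · subst hwn; rw [if_pos rfl]; exact gappD_self ns defA defA
        · rw [if_neg hwn, getA]
          rcases Nat.lt_or_ge w n with h | h
          · exact gappD_lt ns defA defA w h
          · have : n < w := by omega
            simp only [getA]
            rw [gappD_gt ns defA defA w this, gD_ge ns defA w (by omega)]
    have hgC : ∀ w, getC ((cb ++ [PySem.Dict.empty]).set u ((getC cb u).insert c cb.length)) w =
        if w = u then (getC cb u).insert c n
        else if w = n then PySem.Dict.empty else getC cb w := by
      intro w
      by_cases hw : w = u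
      · subst hw
        rw [if_pos rfl, getC, gsetD_self, hnb]
        simp only [List.length_append, List.length_cons]; omega
      · rw [if_neg hw, getC, gsetD_ne _ _ _ _ _ hw]
        by_cases hwn : w = n
        · subst hwn; rw [if_pos rfl, ← hnb]; exact gappD_self cb PySem.Dict.empty PySem.Dict.empty
        · rw [if_neg hwn]
          rcases Nat.lt_or_ge w n with h | h
          · exact gappD_lt cb PySem.Dict.empty PySem.Dict.empty w (by omega)
          · have : n < w := by omega
            simp only [getC]
            rw [gappD_gt cb PySem.Dict.empty PySem.Dict.empty w (by omega), gD_ge cb PySem.Dict.empty w (by omega)]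
    have hc2 : cnt.length = n := hI.hlen₂
    have hcntD : ∀ w, (cnt ++ [(0:Int)]).getD w 0 = (if w = n then 0 else cnt.getD w 0) := by
      intro w
      by_cases hwn : w = n
      · subst hwn; rw [if_pos rfl]
        rw [← hc2]; exact gappD_self cnt 0 0
      · rw [if_neg hwn]
        rcases Nat.lt_or_ge w n with h | h
        · exact gappD_lt cnt 0 0 w (by omega)
        · rw [gappD_gt cnt 0 0 w (by omega), gD_ge cnt 0 w (by omega)]
    refine ⟨⟨?_, ?_, ?_, ?_, ?_, ?_, ?_, ?_, ?_, ?_, ?_⟩, hnb.symm,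
      by simp only [List.length_set, List.length_append, List.length_singleton]; omega,
      by simpa using hu⟩
    · simp only [List.length_set, List.length_append, List.length_singleton]; omega
    · simp only [List.length_set, List.length_append, List.length_singleton]; omega
    · simp only [List.length_set, List.length_append, List.length_singleton]; omega
    · intro w
      rw [hgA w, hgC w]
      by_cases hw : w = u
      · simp [hw, hmapeq]
      · rw [if_neg hw, if_neg hw]
        by_cases hwn : w = n
        · rw [if_pos hwn, if_pos hwn]; rfl
        · rw [if_neg hwn, if_neg hwn]; exact hI.hch w
    · intro w; rw [hgA w]
      by_cases hw : w = u
      · simp [hw]; exact hI.hfail u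
      · rw [if_neg hw]
        by_cases hwn : w = n
        · rw [if_pos hwn]; rfl
        · rw [if_neg hwn]; exact hI.hfail w
    · intro w; rw [hgA w]
      by_cases hw : w = u
      · simp [hw]; exact hI.hout u
      · rw [if_neg hw]
        by_cases hwn : w = n
        · rw [if_pos hwn]; rfl
        · rw [if_neg hwn]; exact hI.hout w
    · rw [hcntD 0, if_neg (by omega)]; exact hI.hcnt0
    · intro w hw
      rw [hcntD w, hgA w]
      by_cases hwu : w = u
      · rw [if_neg (by omega), hwu]
        simpa using hI.hcnt u (hwu ▸ hw)
      · rw [if_neg hwu]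
        by_cases hwn : w = n
        · rw [if_pos hwn, if_pos hwn]; simp [defA]
        · rw [if_neg hwn, if_neg hwn]; exact hI.hcnt w hw
    · intro w c' v h
      rw [hgA w] at h
      by_cases hwu : w = u
      · rw [if_pos hwu] at h
        simp only [PySem.Dict.get?_insert] at h
        have hv : v = n ∨ (u < v ∧ v < n) := by
          split at h
          · simp only [Option.some.injEq] at h; left; omega
          · right; exact hI.hedge u c' v h
        constructor
        · rcases hv with hv | hv <;> omega
        · simp only [List.length_set, List.length_append, List.length_singleton]
          rcases hv with hv | hv <;> omega
      · rw [if_neg hwu] at h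
        by_cases hwn : w = n
        · rw [if_pos hwn] at h; simp [defA, PySem.Dict.get?_empty] at h
        · rw [if_neg hwn] at h
          have := hI.hedge w c' v h
          refine ⟨this.1, ?_⟩
          simp only [List.length_set, List.length_append, List.length_singleton]; omega
    · intro w c₁ w' c₂ v h1 h2
      rw [hgA w] at h1; rw [hgA w'] at h2
      have hfresh : ∀ x d y, (getA ns x).children.get? d = some y → y < n := fun x d y hx =>
        (hI.hedge x d y hx).2
      by_cases hwu : w = u
      · rw [if_pos hwu] at h1
        simp only [PySem.Dict.get?_insert] at h1
        by_cases hw'u : w' = u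
        · rw [if_pos hw'u] at h2
          simp only [PySem.Dict.get?_insert] at h2
          split at h1 <;> split at h2
          · rename_i hc1 hc2; exact ⟨hwu.trans hw'u.symm, hc1.trans hc2.symm⟩
          · simp only [Option.some.injEq] at h1
            have := hfresh u c₂ v h2; omega
          · simp only [Option.some.injEq] at h2
            have := hfresh u c₁ v h1; omega
          · have := hI.hinj u c₁ u c₂ v h1 h2
            exact ⟨hwu.trans hw'u.symm, this.2⟩
        · rw [if_neg hw'u] at h2
          by_cases hw'n : w' = n
          · rw [if_pos hw'n] at h2; simp [defA, PySem.Dict.get?_empty] at h2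
          · rw [if_neg hw'n] at h2
            split at h1
            · simp only [Option.some.injEq] at h1
              have := hfresh w' c₂ v h2; omega
            · have := hI.hinj u c₁ w' c₂ v h1 h2
              exact ⟨hwu.trans this.1, this.2⟩
      · rw [if_neg hwu] at h1
        by_cases hwn : w = n
        · rw [if_pos hwn] at h1; simp [defA, PySem.Dict.get?_empty] at h1
        · rw [if_neg hwn] at h1
          by_cases hw'u : w' = u
          · rw [if_pos hw'u] at h2
            simp only [PySem.Dict.get?_insert] at h2
            split at h2
            · simp only [Option.some.injEq] at h2
              have := hfresh w c₁ v h1; omega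
            · have := hI.hinj w c₁ u c₂ v h1 h2
              exact ⟨this.1.trans hw'u.symm, this.2⟩
          · rw [if_neg hw'u] at h2
            by_cases hw'n : w' = n
            · rw [if_pos hw'n] at h2; simp [defA, PySem.Dict.get?_empty] at h2
            · rw [if_neg hw'n] at h2
              exact hI.hinj w c₁ w' c₂ v h1 h2
    · intro w; rw [hgA w]
      by_cases hwu : w = u
      · rw [if_pos hwu]
        exact PySem.Dict.nodup_keys_insert _ _ _ (hI.hkeys u)
      · rw [if_neg hwu]
        by_cases hwn : w = n
        · rw [if_pos hwn]; simp [defA, PySem.Dict.keys_empty]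
        · rw [if_neg hwn]; exact hI.hkeys w


theorem trieFold_inv (p : List Char) : ∀ (ns : List NodeA) (cb : List (PySem.Dict Char Nat))
    (cnt : List Int) (u : Nat), TrieInv ns cb cnt → u < ns.length →
    TrieInv (p.foldl trieStepA (ns, u)).1 (p.foldl trieStepB ((cb, cnt), u)).1.1
      (p.foldl trieStepB ((cb, cnt), u)).1.2 ∧
    (p.foldl trieStepA (ns, u)).2 = (p.foldl trieStepB ((cb, cnt), u)).2 ∧
    (p.foldl trieStepA (ns, u)).2 < (p.foldl trieStepA (ns, u)).1.length ∧
    ((0 < u ∨ p ≠ []) → 0 < (p.foldl trieStepA (ns, u)).2) := by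
  induction p with
  | nil =>
    intro ns cb cnt u hI hu
    exact ⟨hI, rfl, hu, fun h => by rcases h with h | h; exact h; simp at h⟩
  | cons c cs ih =>
    intro ns cb cnt u hI hu
    have hs := trieStep_inv ns cb cnt u c hI hu
    have hre : (c :: cs).foldl trieStepA (ns, u) = cs.foldl trieStepA (trieStepA (ns, u) c) := rfl
    have hreB : (c :: cs).foldl trieStepB ((cb, cnt), u) =
        cs.foldl trieStepB (trieStepB ((cb, cnt), u) c) := rfl
    rw [hre, hreB]
    have heta : trieStepA (ns, u) c = ((trieStepA (ns, u) c).1, (trieStepA (ns, u) c).2) := rfl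
    have hetaB : trieStepB ((cb, cnt), u) c =
        (((trieStepB ((cb, cnt), u) c).1.1, (trieStepB ((cb, cnt), u) c).1.2),
          (trieStepB ((cb, cnt), u) c).2) := rfl
    rw [heta, hetaB, ← hs.2.1]
    have := ih (trieStepA (ns, u) c).1 (trieStepB ((cb, cnt), u) c).1.1
      (trieStepB ((cb, cnt), u) c).1.2 (trieStepA (ns, u) c).2 hs.1 hs.2.2.1
    exact ⟨this.1, this.2.1, this.2.2.1, fun _ => this.2.2.2 (Or.inl (by omega))⟩

theorem setPat0_inv (ns : List NodeA) (cb : List (PySem.Dict Char Nat)) (cnt : List Int)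
    (x : Int × Int) (hI : TrieInv ns cb cnt) :
    TrieInv (ns.set 0 { getA ns 0 with patterns := (getA ns 0).patterns ++ [x] }) cb cnt := by
  have hg : ∀ w, getA (ns.set 0 { getA ns 0 with patterns := (getA ns 0).patterns ++ [x] }) w =
      if w = 0 then { getA ns 0 with patterns := (getA ns 0).patterns ++ [x] } else getA ns w := by
    intro w
    by_cases hw : w = 0
    · subst hw; rw [if_pos rfl]; exact getA_set_self ns 0 _ hI.hpos
    · rw [if_neg hw]; exact getA_set_ne ns 0 w _ hw
  refine ⟨by simpa using hI.hlen₁, by simpa using hI.hlen₂, by simpa using hI.hpos,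
    ?_, ?_, ?_, hI.hcnt0, ?_, ?_, ?_, ?_⟩
  · intro w; rw [hg w]; by_cases hw : w = 0
    · subst hw; rw [if_pos rfl]; exact hI.hch 0
    · rw [if_neg hw]; exact hI.hch w
  · intro w; rw [hg w]; by_cases hw : w = 0
    · subst hw; rw [if_pos rfl]; exact hI.hfail 0
    · rw [if_neg hw]; exact hI.hfail w
  · intro w; rw [hg w]; by_cases hw : w = 0
    · subst hw; rw [if_pos rfl]; exact hI.hout 0
    · rw [if_neg hw]; exact hI.hout w
  · intro w hw; rw [hg w, if_neg (by omega)]; exact hI.hcnt w hw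
  · intro w c v h; rw [hg w] at h
    by_cases hw : w = 0
    · subst hw; rw [if_pos rfl] at h; simpa using hI.hedge 0 c v h
    · rw [if_neg hw] at h; simpa using hI.hedge w c v h
  · intro w c₁ w' c₂ v h1 h2; rw [hg w] at h1; rw [hg w'] at h2
    by_cases hw : w = 0
    · subst hw; rw [if_pos rfl] at h1
      by_cases hw' : w' = 0
      · subst hw'; rw [if_pos rfl] at h2; exact hI.hinj 0 c₁ 0 c₂ v h1 h2
      · rw [if_neg hw'] at h2; exact hI.hinj 0 c₁ w' c₂ v h1 h2
    · rw [if_neg hw] at h1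
      by_cases hw' : w' = 0
      · subst hw'; rw [if_pos rfl] at h2; exact hI.hinj w c₁ 0 c₂ v h1 h2
      · rw [if_neg hw'] at h2; exact hI.hinj w c₁ w' c₂ v h1 h2
  · intro w; rw [hg w]; by_cases hw : w = 0
    · subst hw; rw [if_pos rfl]; exact hI.hkeys 0
    · rw [if_neg hw]; exact hI.hkeys w

theorem setPatU_inv (ns : List NodeA) (cb : List (PySem.Dict Char Nat)) (cnt : List Int)
    (u : Nat) (x : Int × Int) (hI : TrieInv ns cb cnt) (hu0 : 0 < u) (hu : u < ns.length) :
    TrieInv (ns.set u { getA ns u with patterns := (getA ns u).patterns ++ [x] }) cb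
      (cnt.set u (cnt.getD u 0 + 1)) := by
  have hg : ∀ w, getA (ns.set u { getA ns u with patterns := (getA ns u).patterns ++ [x] }) w =
      if w = u then { getA ns u with patterns := (getA ns u).patterns ++ [x] } else getA ns w := by
    intro w
    by_cases hw : w = u
    · subst hw; rw [if_pos rfl]; exact getA_set_self ns w _ hu
    · rw [if_neg hw]; exact getA_set_ne ns u w _ hw
  have hcd : ∀ w, (cnt.set u (cnt.getD u 0 + 1)).getD w 0 =
      if w = u then cnt.getD u 0 + 1 else cnt.getD w 0 := by
    intro w
    by_cases hw : w = u
    · subst hw; rw [if_pos rfl]; exact gsetD_self cnt w _ 0 (by rw [hI.hlen₂]; exact hu)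
    · rw [if_neg hw]; exact gsetD_ne cnt u w _ 0 hw
  refine ⟨by simpa using hI.hlen₁, by simpa using hI.hlen₂, by simpa using hI.hpos,
    ?_, ?_, ?_, ?_, ?_, ?_, ?_, ?_⟩
  · intro w; rw [hg w]; by_cases hw : w = u
    · subst hw; rw [if_pos rfl]; exact hI.hch w
    · rw [if_neg hw]; exact hI.hch w
  · intro w; rw [hg w]; by_cases hw : w = u
    · subst hw; rw [if_pos rfl]; exact hI.hfail w
    · rw [if_neg hw]; exact hI.hfail w
  · intro w; rw [hg w]; by_cases hw : w = u
    · subst hw; rw [if_pos rfl]; exact hI.hout w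
    · rw [if_neg hw]; exact hI.hout w
  · rw [hcd 0, if_neg (by omega)]; exact hI.hcnt0
  · intro w hw; rw [hcd w, hg w]; by_cases hwu : w = u
    · subst hwu; rw [if_pos rfl, if_pos rfl, hI.hcnt w hw]
      simp
    · rw [if_neg hwu, if_neg hwu]; exact hI.hcnt w hw
  · intro w c v h; rw [hg w] at h
    by_cases hw : w = u
    · subst hw; rw [if_pos rfl] at h; simpa using hI.hedge w c v h
    · rw [if_neg hw] at h; simpa using hI.hedge w c v h
  · intro w c₁ w' c₂ v h1 h2; rw [hg w] at h1; rw [hg w'] at h2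
    by_cases hw : w = u
    · subst hw; rw [if_pos rfl] at h1
      by_cases hw' : w' = w
      · subst hw'; rw [if_pos rfl] at h2; exact hI.hinj _ c₁ _ c₂ v h1 h2
      · rw [if_neg hw'] at h2; exact hI.hinj w c₁ w' c₂ v h1 h2
    · rw [if_neg hw] at h1
      by_cases hw' : w' = u
      · subst hw'; rw [if_pos rfl] at h2; exact hI.hinj w c₁ w' c₂ v h1 h2
      · rw [if_neg hw'] at h2; exact hI.hinj w c₁ w' c₂ v h1 h2
  · intro w; rw [hg w]; by_cases hw : w = u
    · subst hw; rw [if_pos rfl]; exact hI.hkeys w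
    · rw [if_neg hw]; exact hI.hkeys w

theorem insPat_inv (ns : List NodeA) (cb : List (PySem.Dict Char Nat)) (cnt : List Int)
    (p : List Char) (hI : TrieInv ns cb cnt) :
    TrieInv (insPatA ns p) (insPatB cb cnt p).1 (insPatB cb cnt p).2 := by
  have h := trieFold_inv p ns cb cnt 0 hI hI.hpos
  by_cases hp : p = []
  · subst hp
    have hB : insPatB cb cnt [] = (cb, cnt) := rfl
    rw [hB]
    exact setPat0_inv ns cb cnt _ hI
  · have hu0 := h.2.2.2 (Or.inr hp)
    have hB : insPatB cb cnt p =
        ((p.foldl trieStepB ((cb, cnt), 0)).1.1,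
          (p.foldl trieStepB ((cb, cnt), 0)).1.2.set (p.foldl trieStepB ((cb, cnt), 0)).2
            ((p.foldl trieStepB ((cb, cnt), 0)).1.2.getD (p.foldl trieStepB ((cb, cnt), 0)).2 0 + 1)) := by
      simp [insPatB, hp]
    rw [hB, ← h.2.1]
    exact setPatU_inv _ _ _ _ _ h.1 hu0 h.2.2.1

theorem trieBase_inv : TrieInv [defA] [PySem.Dict.empty] [(0 : Int)] := by
  refine ⟨rfl, rfl, by simp, ?_, ?_, ?_, rfl, ?_, ?_, ?_, ?_⟩
  · intro u; match u with
    | 0 => rfl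
    | k + 1 => rfl
  · intro u; match u with
    | 0 => rfl
    | k + 1 => rfl
  · intro u; match u with
    | 0 => rfl
    | k + 1 => rfl
  · intro u hu; match u, hu with
    | k + 1, _ => rfl
  · intro u c v h
    have : (getA [defA] u).children = PySem.Dict.empty := by
      match u with
      | 0 => rfl
      | k + 1 => rfl
    rw [this, PySem.Dict.get?_empty] at h; cases h
  · intro u c₁ u' c₂ v h1 h2
    have : (getA [defA] u).children = PySem.Dict.empty := by
      match u with
      | 0 => rfl
      | k + 1 => rfl
    rw [this, PySem.Dict.get?_empty] at h1; cases h1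
  · intro u
    have : (getA [defA] u).children = PySem.Dict.empty := by
      match u with
      | 0 => rfl
      | k + 1 => rfl
    rw [this, PySem.Dict.keys_empty]; exact List.nodup_nil

theorem buildFold_inv (ps : List String) : ∀ (ns : List NodeA)
    (cb : List (PySem.Dict Char Nat)) (cnt : List Int), TrieInv ns cb cnt →
    TrieInv (ps.foldl (fun ns p => insPatA ns p.toList) ns)
      (ps.foldl (fun st p => insPatB st.1 st.2 p.toList) (cb, cnt)).1
      (ps.foldl (fun st p => insPatB st.1 st.2 p.toList) (cb, cnt)).2 := by
  induction ps with
  | nil => intro ns cb cnt hI; exact hI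
  | cons p ps ih =>
    intro ns cb cnt hI
    simp only [List.foldl_cons]
    exact ih _ _ _ (insPat_inv ns cb cnt p.toList hI)

theorem buildTrie_inv (patterns : List String) :
    TrieInv (buildTrieA patterns) (buildTrieB patterns).1 (buildTrieB patterns).2 :=
  buildFold_inv patterns [defA] [PySem.Dict.empty] [(0 : Int)] trieBase_inv


-- ===== BFS phase invariant =====
structure BfsInv (T ns : List NodeA) (cb : List (PySem.Dict Char Nat)) (cnt : List Int)
    (fb : List Nat) (P q : List Nat) : Prop where
  hlen_cb : cb.length = ns.length
  hlen_cnt : cnt.length = ns.length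
  hlen_fb : fb.length = ns.length
  hlen_T : T.length = ns.length
  hpos : 0 < ns.length
  hch : ∀ u, (getA ns u).children = getC cb u
  hfb : ∀ u, fb.getD u 0 = ((getA ns u).fail).getD 0
  hpat : ∀ u, (getA ns u).patterns = (getA T u).patterns
  hcnt0 : cnt.getD 0 0 = 0
  houtU : ∀ u, u ∉ P → (getA ns u).output = none
  hcntU : ∀ u, 0 < u → u ∉ P → cnt.getD u 0 = ((getA ns u).patterns.length : Int)
  hchU : ∀ u, u ∉ P → (getA ns u).children = (getA T u).children
  hcntP : ∀ i, (h : i < P.length) → cnt.getD P[i] 0 = ((getA ns P[i]).patterns.length : Int) +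
      (match (getA ns P[i]).output with | none => 0 | some v => cnt.getD v 0)
  houtP : ∀ i, (h : i < P.length) → ∀ v, (getA ns P[i]).output = some v →
      v = 0 ∨ ∃ j, ∃ _ : j < i, P[j] = v
  hnd : (P ++ q).Nodup
  hmem : ∀ u ∈ P ++ q, 0 < u ∧ u < ns.length
  hpar : ∀ u ∈ P ++ q, ∃ p c, (getA T p).children.get? c = some u ∧ (p = 0 ∨ p ∈ P)
  hroot : ∀ c v, (getA T 0).children.get? c = some v → v ∈ P ++ q
  hqf : ∀ i, (h : i < q.length) → fb.getD q[i] 0 = 0 ∨ fb.getD q[i] 0 ∈ P ∨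
      ∃ j, ∃ _ : j < i, q[j] = fb.getD q[i] 0
  hPch : ∀ f ∈ P, ∀ c ∈ azChars, ∀ w, (getA ns f).children.get? c = some w →
      w = 0 ∨ w ∈ P ++ q

theorem bfsInv_root_notin {T ns cb cnt fb P q} (I : BfsInv T ns cb cnt fb P q) : 0 ∉ P := by
  intro h
  exact absurd (I.hmem 0 (List.mem_append_left _ h)).1 (lt_irrefl 0)

-- the `for char, node in root.children.items()` fold of A
theorem initFold_spec (l : List (Char × Nat)) : ∀ (ns : List NodeA) (q0 : List Nat),
    (∀ p ∈ l, p.2 < ns.length) →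
    (l.foldl (fun st p => (st.1.set p.2 { getA st.1 p.2 with fail := some 0 }, st.2 ++ [p.2]))
        (ns, q0)).1.length = ns.length ∧
    (l.foldl (fun st p => (st.1.set p.2 { getA st.1 p.2 with fail := some 0 }, st.2 ++ [p.2]))
        (ns, q0)).2 = q0 ++ l.map (·.2) ∧
    (∀ w, (getA (l.foldl (fun st p => (st.1.set p.2 { getA st.1 p.2 with fail := some 0 },
        st.2 ++ [p.2])) (ns, q0)).1 w).children = (getA ns w).children ∧
      (getA (l.foldl (fun st p => (st.1.set p.2 { getA st.1 p.2 with fail := some 0 },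
        st.2 ++ [p.2])) (ns, q0)).1 w).output = (getA ns w).output ∧
      (getA (l.foldl (fun st p => (st.1.set p.2 { getA st.1 p.2 with fail := some 0 },
        st.2 ++ [p.2])) (ns, q0)).1 w).patterns = (getA ns w).patterns) ∧
    (∀ w, (getA (l.foldl (fun st p => (st.1.set p.2 { getA st.1 p.2 with fail := some 0 },
        st.2 ++ [p.2])) (ns, q0)).1 w).fail =
      if w ∈ l.map (·.2) then some 0 else (getA ns w).fail) := by
  induction l with
  | nil => intro ns q0 _; exact ⟨rfl, by simp, fun w => ⟨rfl, rfl, rfl⟩, fun w => by simp⟩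
  | cons p l ih =>
    intro ns q0 hlt
    have hp2 : p.2 < ns.length := hlt p (List.mem_cons_self ..)
    set ns1 := ns.set p.2 { getA ns p.2 with fail := some 0 } with hns1
    have hg : ∀ w, getA ns1 w =
        if w = p.2 then { getA ns p.2 with fail := some 0 } else getA ns w := by
      intro w
      by_cases hw : w = p.2
      · subst hw; rw [if_pos rfl]; exact getA_set_self ns p.2 _ hp2
      · rw [if_neg hw]; exact getA_set_ne ns p.2 w _ hw
    have hlt1 : ∀ r ∈ l, r.2 < ns1.length := by
      intro r hr; rw [hns1, List.length_set]; exact hlt r (List.mem_cons_of_mem _ hr)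
    have hfold : (p :: l).foldl (fun st r => (st.1.set r.2 { getA st.1 r.2 with fail := some 0 },
        st.2 ++ [r.2])) (ns, q0) = l.foldl (fun st r => (st.1.set r.2
        { getA st.1 r.2 with fail := some 0 }, st.2 ++ [r.2])) (ns1, q0 ++ [p.2]) := rfl
    rw [hfold]
    obtain ⟨ih1, ih2, ih3, ih4⟩ := ih ns1 (q0 ++ [p.2]) hlt1
    refine ⟨by rw [ih1, hns1, List.length_set], by rw [ih2]; simp, ?_, ?_⟩
    · intro w
      obtain ⟨a, b, c⟩ := ih3 w
      rw [a, b, c, hg w]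
      by_cases hw : w = p.2
      · subst hw; rw [if_pos rfl]; exact ⟨rfl, rfl, rfl⟩
      · rw [if_neg hw]; exact ⟨rfl, rfl, rfl⟩
    · intro w
      rw [ih4 w, hg w]
      by_cases hmem : w ∈ l.map (·.2)
      · rw [if_pos hmem, if_pos (by simp [hmem])]
      · rw [if_neg hmem]
        by_cases hw : w = p.2
        · subst hw; rw [if_pos rfl, if_pos (by simp)]
        · rw [if_neg hw, if_neg (by simp [hw, hmem])]


theorem repD_zero (n w : Nat) : (List.replicate n (0 : Nat)).getD w 0 = 0 := by
  rcases Nat.lt_or_ge w n with h | h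
  · simp [List.getD, h]
  · rw [gD_ge _ _ _ (by simpa using h)]

theorem init_establish (patterns : List String) :
    BfsInv (buildTrieA patterns) (initA (buildTrieA patterns)).1 (buildTrieB patterns).1
      (buildTrieB patterns).2 (List.replicate (buildTrieB patterns).1.length 0) []
      (initA (buildTrieA patterns)).2 ∧
    (initA (buildTrieA patterns)).2 = (getC (buildTrieB patterns).1 0).values := by
  have hI := buildTrie_inv patterns
  set T := buildTrieA patterns with hT
  set cb := (buildTrieB patterns).1 with hcb
  set cnt := (buildTrieB patterns).2 with hcnt
  set l := (getA T 0).children.items with hl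
  have hnk : (getA T 0).children.keys.Nodup := hI.hkeys 0
  have hget : ∀ p ∈ l, (getA T 0).children.get? p.1 = some p.2 := by
    intro p hp
    have hp' : (p.1, p.2) ∈ (getA T 0).children.items := by rw [← hl]; exact hp
    exact PySem.Dict.get?_of_mem_items _ hp' hnk
  have hlt : ∀ p ∈ l, p.2 < T.length := fun p hp => (hI.hedge 0 p.1 p.2 (hget p hp)).2
  have S := initFold_spec l T [] hlt
  have hinitA : initA T = l.foldl (fun st p => (st.1.set p.2
      { getA st.1 p.2 with fail := some 0 }, st.2 ++ [p.2])) (T, []) := rfl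
  obtain ⟨S1, S2, S3, S4⟩ := S
  have hq : (initA T).2 = l.map (·.2) := by rw [hinitA, S2]; simp
  have hvals : (getC cb 0).values = l.map (·.2) := by
    rw [PySem.Dict.values, ← hI.hch 0, ← hl]
  have hqnd : ((initA T).2).Nodup := by
    rw [hq]
    have hlnd : l.Nodup := by
      have : (l.map (·.1)).Nodup := by rw [hl]; exact hnk
      exact this.of_map
    refine hlnd.map_on ?_
    intro p hp p' hp' hpe
    have h1 := hget p hp
    have h2 := hget p' hp'
    rw [← hpe] at h2
    have := hI.hinj 0 p.1 0 p'.1 p.2 h1 h2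
    have hfst : p.1 = p'.1 := this.2
    exact Prod.ext hfst hpe
  have hmemq : ∀ u ∈ (initA T).2, 0 < u ∧ u < T.length := by
    intro u hu
    rw [hq, List.mem_map] at hu
    obtain ⟨p, hp, hpe⟩ := hu
    have := hI.hedge 0 p.1 p.2 (hget p hp)
    omega
  refine ⟨⟨?_, ?_, ?_, ?_, ?_, ?_, ?_, ?_, ?_, ?_, ?_, ?_, ?_, ?_, ?_, ?_, ?_, ?_, ?_, ?_⟩, by rw [hq, hvals]⟩
  · rw [hinitA, S1]; exact hI.hlen₁
  · rw [hinitA, S1]; exact hI.hlen₂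
  · rw [hinitA, S1, List.length_replicate]; exact hI.hlen₁
  · rw [hinitA, S1]
  · rw [hinitA, S1]; exact hI.hpos
  · intro u; rw [hinitA, (S3 u).1]; exact hI.hch u
  · intro u
    rw [repD_zero, hinitA, S4 u]
    by_cases hm : u ∈ l.map (·.2)
    · rw [if_pos hm]; rfl
    · rw [if_neg hm, hI.hfail u]; rfl
  · intro u; rw [hinitA, (S3 u).2.2]
  · exact hI.hcnt0
  · intro u _; rw [hinitA, (S3 u).2.1]; exact hI.hout u
  · intro u hu _; rw [hinitA, (S3 u).2.2]; exact hI.hcnt u hu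
  · intro u _; rw [hinitA, (S3 u).1]
  · intro i h; simp at h
  · intro i h; simp at h
  · simpa using hqnd
  · intro u hu
    simp only [List.nil_append] at hu
    have := hmemq u hu
    rw [hinitA, S1]; exact this
  · intro u hu
    simp only [List.nil_append] at hu
    rw [hq, List.mem_map] at hu
    obtain ⟨p, hp, hpe⟩ := hu
    exact ⟨0, p.1, by rw [← hpe]; exact hget p hp, Or.inl rfl⟩
  · intro c v h
    simp only [List.nil_append]
    rw [hq]
    have : (c, v) ∈ l := by rw [hl]; exact PySem.Dict.mem_items_of_get?_eq_some _ h
    exact List.mem_map.mpr ⟨(c, v), this, rfl⟩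
  · intro i h
    left; exact repD_zero _ _
  · intro f hf; simp at hf


-- invariant maintained through the inner a..z loop of the BFS body
structure LoopInv (T : List NodeA) (u : Nat) (P : List Nat) (ns : List NodeA)
    (cb : List (PySem.Dict Char Nat)) (cnt : List Int) (fb : List Nat)
    (q : List Nat) (cs : List Char) : Prop where
  hlen_cb : cb.length = ns.length
  hlen_cnt : cnt.length = ns.length
  hlen_fb : fb.length = ns.length
  hlen_T : T.length = ns.length
  hpos : 0 < ns.length
  hch : ∀ w, (getA ns w).children = getC cb w
  hfb : ∀ w, fb.getD w 0 = ((getA ns w).fail).getD 0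
  hpat : ∀ w, (getA ns w).patterns = (getA T w).patterns
  hcnt0 : cnt.getD 0 0 = 0
  houtU : ∀ w, w ∉ P ++ [u] → (getA ns w).output = none
  hcntU : ∀ w, 0 < w → w ∉ P ++ [u] → cnt.getD w 0 = ((getA ns w).patterns.length : Int)
  hchU : ∀ w, w ∉ P ++ [u] → (getA ns w).children = (getA T w).children
  hcntP : ∀ i, (h : i < (P ++ [u]).length) → cnt.getD (P ++ [u])[i] 0 =
      ((getA ns (P ++ [u])[i]).patterns.length : Int) +
      (match (getA ns (P ++ [u])[i]).output with | none => 0 | some v => cnt.getD v 0)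
  houtP : ∀ i, (h : i < (P ++ [u]).length) → ∀ v, (getA ns (P ++ [u])[i]).output = some v →
      v = 0 ∨ ∃ j, ∃ _ : j < i, (P ++ [u])[j] = v
  hnd : ((P ++ [u]) ++ q).Nodup
  hmem : ∀ w ∈ (P ++ [u]) ++ q, 0 < w ∧ w < ns.length
  hpar : ∀ w ∈ (P ++ [u]) ++ q, ∃ p c, (getA T p).children.get? c = some w ∧
      (p = 0 ∨ p ∈ P ++ [u])
  hroot : ∀ c v, (getA T 0).children.get? c = some v → v ∈ (P ++ [u]) ++ q
  hqf : ∀ i, (h : i < q.length) → fb.getD q[i] 0 = 0 ∨ fb.getD q[i] 0 ∈ P ++ [u] ∨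
      ∃ j, ∃ _ : j < i, q[j] = fb.getD q[i] 0
  hPch : ∀ f ∈ P, ∀ c ∈ azChars, ∀ w, (getA ns f).children.get? c = some w →
      w = 0 ∨ w ∈ (P ++ [u]) ++ q
  hsub : cs.Sublist azChars
  hupos : 0 < u
  hult : u < ns.length
  huP : u ∉ P
  hufb : fb.getD u 0 = 0 ∨ fb.getD u 0 ∈ P
  hrem : ∀ c ∈ cs, (getA ns u).children.get? c = (getA T u).children.get? c
  hdone : ∀ c, c ∉ cs → c ∈ azChars → ∀ w, (getA ns u).children.get? c = some w →
      w = 0 ∨ w ∈ (P ++ [u]) ++ q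
  hfresh : ∀ c ∈ cs, ∀ v, (getA T u).children.get? c = some v → v ∉ (P ++ [u]) ++ q

theorem loop_init (T ns : List NodeA) (cb : List (PySem.Dict Char Nat)) (cnt : List Int)
    (fb : List Nat) (P : List Nat) (u : Nat) (q : List Nat)
    (hTi : ∀ w c w' c' v, (getA T w).children.get? c = some v →
      (getA T w').children.get? c' = some v → w = w' ∧ c = c')
    (I : BfsInv T ns cb cnt fb P (u :: q)) :
    LoopInv T u P
      (ns.set u { getA ns u with output := (if (getA ns (fb.getD u 0)).patterns ≠ []
        then some (fb.getD u 0) else (getA ns (fb.getD u 0)).output) })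
      cb (cnt.set u (cnt.getD u 0 + cnt.getD (fb.getD u 0) 0)) fb q azChars := by
  have h0P : 0 ∉ P := bfsInv_root_notin I
  have humem := I.hmem u (by simp)
  have hupos : 0 < u := humem.1
  have hult : u < ns.length := humem.2
  have hndPuq : ((P ++ [u]) ++ q).Nodup := by
    rw [List.append_assoc, List.singleton_append]; exact I.hnd
  have huP : u ∉ P := by
    intro h
    have := List.disjoint_of_nodup_append I.hnd
    exact this h (by simp)
  have huq : u ∉ q := by
    have := (List.nodup_append.mp I.hnd).2.1
    simp at this; exact this.1
  have hufb : fb.getD u 0 = 0 ∨ fb.getD u 0 ∈ P := by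
    have := I.hqf 0 (by simp)
    simp only [List.getElem_cons_zero] at this
    rcases this with h | h | ⟨j, hj, _⟩
    · exact Or.inl h
    · exact Or.inr h
    · omega
  set f := fb.getD u 0 with hf
  have hfne : f ≠ u := by
    rcases hufb with h | h
    · omega
    · intro he; rw [he] at h; exact huP h
  set outv := (if (getA ns f).patterns ≠ [] then some f else (getA ns f).output) with houtv
  set nd := { getA ns u with output := outv } with hnd'
  have hg : ∀ w, getA (ns.set u nd) w = if w = u then nd else getA ns w := by
    intro w
    by_cases hw : w = u
    · subst hw; rw [if_pos rfl]; exact getA_set_self ns w _ hult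
    · rw [if_neg hw]; exact getA_set_ne ns u w _ hw
  have hc : ∀ w, (cnt.set u (cnt.getD u 0 + cnt.getD f 0)).getD w 0 =
      if w = u then cnt.getD u 0 + cnt.getD f 0 else cnt.getD w 0 := by
    intro w
    by_cases hw : w = u
    · subst hw; rw [if_pos rfl]; exact gsetD_self cnt w _ 0 (by rw [I.hlen_cnt]; exact hult)
    · rw [if_neg hw]; exact gsetD_ne cnt u w _ 0 hw
  have hPe : ∀ (i : Nat) (h : i < P.length),
      (P ++ [u])[i]'(by simp; omega) = P[i]'h := fun i h => List.getElem_append_left h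
  have hPu : (P ++ [u])[P.length]'(by simp) = u := by simp
  have hPiu : ∀ i, (h : i < P.length) → P[i] ≠ u := by
    intro i h he; exact huP (he ▸ List.getElem_mem h)
  have hmemset : ∀ w, w ∈ (P ++ [u]) ++ q ↔ w ∈ P ++ u :: q := by
    intro w; rw [List.append_assoc, List.singleton_append]
  refine ⟨by simpa using I.hlen_cb, by simpa using I.hlen_cnt, by simpa using I.hlen_fb,
    by simpa using I.hlen_T, by simpa using I.hpos, ?_, ?_, ?_, ?_, ?_, ?_, ?_, ?_, ?_,
    hndPuq, ?_, ?_, ?_, ?_, ?_, List.Sublist.refl _, hupos, by simpa using hult, huP,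
    hufb, ?_, ?_, ?_⟩
  · intro w; rw [hg w]
    by_cases hw : w = u
    · subst hw; rw [if_pos rfl]; exact I.hch w
    · rw [if_neg hw]; exact I.hch w
  · intro w; rw [hg w]
    by_cases hw : w = u
    · subst hw; rw [if_pos rfl]; exact I.hfb w
    · rw [if_neg hw]; exact I.hfb w
  · intro w; rw [hg w]
    by_cases hw : w = u
    · subst hw; rw [if_pos rfl]; exact I.hpat w
    · rw [if_neg hw]; exact I.hpat w
  · rw [hc 0, if_neg (by omega)]; exact I.hcnt0
  · intro w hw; rw [hg w, if_neg (by intro he; exact hw (by simp [he]))]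
    exact I.houtU w (fun h => hw (by simp [h]))
  · intro w hw0 hw; rw [hc w, if_neg (by intro he; exact hw (by simp [he])), hg w,
      if_neg (by intro he; exact hw (by simp [he]))]
    exact I.hcntU w hw0 (fun h => hw (by simp [h]))
  · intro w hw; rw [hg w, if_neg (by intro he; exact hw (by simp [he]))]
    exact I.hchU w (fun h => hw (by simp [h]))
  · intro i h
    simp only [List.length_append, List.length_singleton] at h
    rcases Nat.lt_or_ge i P.length with hi | hi
    · rw [hPe i hi, hc P[i], if_neg (hPiu i hi), hg P[i], if_neg (hPiu i hi)]
      have := I.hcntP i hi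
      rw [this]
      congr 1
      cases hov : (getA ns P[i]).output with
      | none => rfl
      | some v =>
        have hv := I.houtP i hi v hov
        show cnt.getD v 0 = (cnt.set u (cnt.getD u 0 + cnt.getD f 0)).getD v 0
        rw [hc v]
        rcases hv with h0 | ⟨j, hj, hje⟩
        · rw [if_neg (by omega)]
        · rw [if_neg (by rw [← hje]; exact hPiu j (by omega))]
    · have hieq : i = P.length := by omega
      subst hieq
      rw [List.getElem_concat_length rfl (by simp), hc u, if_pos rfl, hg u, if_pos rfl]
      have hcu : cnt.getD u 0 = ((getA ns u).patterns.length : Int) :=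
        I.hcntU u hupos huP
      show cnt.getD u 0 + cnt.getD f 0 = (nd.patterns.length : Int) +
        (match nd.output with | none => 0 | some v => (cnt.set u _).getD v 0)
      have hndpat : nd.patterns = (getA ns u).patterns := rfl
      have hndout : nd.output = outv := rfl
      rw [hndpat, hndout, ← hcu]
      congr 1
      rw [houtv]
      by_cases hfp : (getA ns f).patterns ≠ []
      · rw [if_pos hfp]
        show cnt.getD f 0 = (cnt.set u _).getD f 0
        rw [hc f, if_neg hfne]
      · rw [if_neg hfp]
        push Not at hfp
        rcases hufb with hf0 | hfP
        · have hout0 : (getA ns f).output = none := by rw [hf0]; exact I.houtU 0 h0P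
          rw [hout0]
          show cnt.getD f 0 = (0 : Int)
          rw [hf0]; exact I.hcnt0
        · obtain ⟨j, hj, hje⟩ := List.mem_iff_getElem.mp hfP
          have hcf := I.hcntP j hj
          rw [hje] at hcf
          cases hov : (getA ns f).output with
          | none =>
            show cnt.getD f 0 = (0 : Int)
            rw [hcf, hov, hfp]; simp
          | some v =>
            show cnt.getD f 0 = (cnt.set u (cnt.getD u 0 + cnt.getD f 0)).getD v 0
            have hvv := I.houtP j hj v (by rw [hje]; exact hov)
            have hcv : (cnt.set u (cnt.getD u 0 + cnt.getD f 0)).getD v 0 = cnt.getD v 0 := by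
              rw [hc v]
              rcases hvv with h0 | ⟨j', hj', hje'⟩
              · rw [if_neg (by omega)]
              · rw [if_neg (by rw [← hje']; exact hPiu j' (by omega))]
            rw [hcv, hcf, hov, hfp]; simp
  · intro i h v hv
    simp only [List.length_append, List.length_singleton] at h
    rcases Nat.lt_or_ge i P.length with hi | hi
    · rw [hPe i hi, hg P[i], if_neg (hPiu i hi)] at hv
      have := I.houtP i hi v hv
      rcases this with h0 | ⟨j, hj, hje⟩
      · exact Or.inl h0
      · exact Or.inr ⟨j, by omega, by rw [hPe j (by omega)]; exact hje⟩
    · have hieq : i = P.length := by omega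
      subst hieq
      rw [List.getElem_concat_length rfl (by simp), hg u, if_pos rfl] at hv
      have : nd.output = outv := rfl
      rw [this, houtv] at hv
      by_cases hfp : (getA ns f).patterns ≠ []
      · rw [if_pos hfp] at hv
        cases hv
        rcases hufb with h0 | hP
        · exact Or.inl h0
        · obtain ⟨j, hj, hje⟩ := List.mem_iff_getElem.mp hP
          exact Or.inr ⟨j, by omega, by rw [hPe j hj]; exact hje⟩
      · rw [if_neg hfp] at hv
        push Not at hfp
        rcases hufb with h0 | hfP
        · rw [h0] at hv
          rw [I.houtU 0 h0P] at hv; cases hv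
        · obtain ⟨j, hj, hje⟩ := List.mem_iff_getElem.mp hfP
          have := I.houtP j hj v (by rw [hje]; exact hv)
          rcases this with h0 | ⟨j', hj', hje'⟩
          · exact Or.inl h0
          · exact Or.inr ⟨j', by omega, by rw [hPe j' (by omega)]; exact hje'⟩
  · intro w hw
    rw [hmemset w] at hw
    have := I.hmem w hw
    simpa using this
  · intro w hw
    rw [hmemset w] at hw
    obtain ⟨p, c, he, hp⟩ := I.hpar w hw
    exact ⟨p, c, he, by rcases hp with h | h; exact Or.inl h; exact Or.inr (by simp [h])⟩
  · intro c v h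
    rw [hmemset v]
    exact I.hroot c v h
  · intro i h
    have hiq := I.hqf (i + 1) (by simp; omega)
    have hidx : (u :: q)[i + 1]'(by simp; omega) = q[i]'h := rfl
    rw [hidx] at hiq
    rcases hiq with h0 | hP | ⟨j, hj, hje⟩
    · exact Or.inl h0
    · exact Or.inr (Or.inl (List.mem_append.mpr (Or.inl hP)))
    · rcases Nat.eq_zero_or_pos j with hj0 | hj0
      · subst hj0
        refine Or.inr (Or.inl ?_)
        rw [← hje]; simp
      · obtain ⟨m, rfl⟩ : ∃ m, j = m + 1 := ⟨j - 1, by omega⟩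
        refine Or.inr (Or.inr ⟨m, by omega, ?_⟩)
        simpa using hje
  · intro g hg' c hc' w hw
    have hgne : g ≠ u := fun he => huP (he ▸ hg')
    rw [hg g, if_neg hgne] at hw
    have := I.hPch g hg' c hc' w hw
    rcases this with h0 | hP
    · exact Or.inl h0
    · exact Or.inr ((hmemset w).mpr hP)
  · intro c _
    rw [hg u, if_pos rfl]
    show (getA ns u).children.get? c = _
    rw [I.hchU u huP]
  · intro c hcn hca w hw
    exact absurd hca hcn
  · intro c hca v hv hmem'
    rw [hmemset v] at hmem'
    obtain ⟨p, c', he, hp⟩ := I.hpar v hmem'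
    have := hTi p c' u c v he hv
    rcases hp with h0 | hP
    · omega
    · rw [this.1] at hP; exact huP hP


theorem azNodup : azChars.Nodup := by decide

theorem loop_run (T : List NodeA) (u : Nat) (P : List Nat)
    (hTe : ∀ w c v, (getA T w).children.get? c = some v → w < v ∧ v < T.length)
    (hTi : ∀ w c w' c' v, (getA T w).children.get? c = some v →
      (getA T w').children.get? c' = some v → w = w' ∧ c = c') :
    ∀ (cs : List Char) (ns : List NodeA) (cb : List (PySem.Dict Char Nat)) (cnt : List Int)
      (fb : List Nat) (q : List Nat), LoopInv T u P ns cb cnt fb q cs →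
    (procCharsA u (ns, q) cs).2 = (procCharsB u (cb, fb, q) cs).2.2 ∧
    LoopInv T u P (procCharsA u (ns, q) cs).1 (procCharsB u (cb, fb, q) cs).1 cnt
      (procCharsB u (cb, fb, q) cs).2.1 (procCharsA u (ns, q) cs).2 [] := by
  intro cs
  induction cs with
  | nil =>
    intro ns cb cnt fb q I
    exact ⟨rfl, I⟩
  | cons c cs ih =>
    intro ns cb cnt fb q I
    have hcaz : c ∈ azChars := I.hsub.mem (List.mem_cons_self ..)
    have hccs : c ∉ cs := by
      have : (c :: cs).Nodup := I.hsub.nodup azNodup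
      exact (List.nodup_cons.mp this).1
    have h0Pu : (0 : Nat) ∉ P ++ [u] := by
      intro h
      rcases List.mem_append.mp h with h | h
      · exact absurd ((I.hmem 0 (List.mem_append_left _ (List.mem_append_left _ h))).1) (lt_irrefl 0)
      · simp at h; have := I.hupos; omega
    set f := fb.getD u 0 with hf
    have hfA : ((getA ns u).fail).getD 0 = f := (I.hfb u).symm
    set w := (getA ns f).children.getD c 0 with hw'
    have hwB : (getC cb f).getD c 0 = w := by rw [← I.hch f]
    have hw : w = 0 ∨ w ∈ (P ++ [u]) ++ q := by
      rw [hw', PySem.Dict.getD_eq_get?_getD]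
      cases hgf : (getA ns f).children.get? c with
      | none => exact Or.inl rfl
      | some x =>
        show x = 0 ∨ x ∈ (P ++ [u]) ++ q
        rcases I.hufb with h0 | hP
        · have h00 : f = 0 := h0
          have hch0 : (getA ns f).children = (getA T 0).children := by
            rw [h00]; exact I.hchU 0 h0Pu
          rw [hch0] at hgf
          exact Or.inr (I.hroot c x hgf)
        · exact I.hPch f hP c hcaz x hgf
    cases hsc : (getA ns u).children.get? c with
    | some v =>
      have hscB : (getC cb u).get? c = some v := by rw [← I.hch u]; exact hsc
      have hvT : (getA T u).children.get? c = some v := by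
        rw [← I.hrem c (List.mem_cons_self ..)]; exact hsc
      have hvb := hTe u c v hvT
      have hvlt : v < ns.length := by rw [← I.hlen_T]; exact hvb.2
      have hvfresh : v ∉ (P ++ [u]) ++ q := I.hfresh c (List.mem_cons_self ..) v hvT
      have hvne_u : v ≠ u := by intro h; subst h; exact hvfresh (by simp)
      set nd := { getA ns v with fail := some w } with hnd'
      have hg : ∀ x, getA (ns.set v nd) x = if x = v then nd else getA ns x := by
        intro x
        by_cases hx : x = v
        · subst hx; rw [if_pos rfl]; exact getA_set_self ns x _ hvlt
        · rw [if_neg hx]; exact getA_set_ne ns v x _ hx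
      have hfbg : ∀ x, (fb.set v w).getD x 0 = if x = v then w else fb.getD x 0 := by
        intro x
        by_cases hx : x = v
        · subst hx; rw [if_pos rfl]; exact gsetD_self fb x _ 0 (by rw [I.hlen_fb]; exact hvlt)
        · rw [if_neg hx]; exact gsetD_ne fb v x _ 0 hx
      have hstepA : procCharsA u (ns, q) (c :: cs) = procCharsA u (ns.set v nd, q ++ [v]) cs := by
        simp only [procCharsA, hsc, hfA, hnd', ← hw']
      have hstepB : procCharsB u (cb, fb, q) (c :: cs) =
          procCharsB u (cb, fb.set v w, q ++ [v]) cs := by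
        simp only [procCharsB, hscB, ← hf, hwB]
      rw [hstepA, hstepB]
      apply ih
      -- LoopInv for the stepped state
      have hvP : v ∉ P ++ [u] := fun h => hvfresh (List.mem_append_left _ h)
      have hvq : v ∉ q := fun h => hvfresh (List.mem_append_right _ h)
      refine ⟨by simpa using I.hlen_cb, by simpa using I.hlen_cnt,
        by simpa using I.hlen_fb, by simpa using I.hlen_T, by simpa using I.hpos,
        ?_, ?_, ?_, I.hcnt0, ?_, ?_, ?_, ?_, ?_, ?_, ?_, ?_, ?_, ?_, ?_,
        (List.sublist_of_cons_sublist I.hsub), I.hupos, by simpa using I.hult, I.huP, ?_, ?_, ?_, ?_⟩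
      · intro x; rw [hg x]
        by_cases hx : x = v
        · subst hx; rw [if_pos rfl]; exact I.hch x
        · rw [if_neg hx]; exact I.hch x
      · intro x; rw [hg x, hfbg x]
        by_cases hx : x = v
        · subst hx; rw [if_pos rfl, if_pos rfl]; rfl
        · rw [if_neg hx, if_neg hx]; exact I.hfb x
      · intro x; rw [hg x]
        by_cases hx : x = v
        · subst hx; rw [if_pos rfl]; exact I.hpat x
        · rw [if_neg hx]; exact I.hpat x
      · intro x hx; rw [hg x]
        by_cases hxv : x = v
        · subst hxv; rw [if_pos rfl]; exact I.houtU x hx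
        · rw [if_neg hxv]; exact I.houtU x hx
      · intro x hx0 hx; rw [hg x]
        by_cases hxv : x = v
        · subst hxv; rw [if_pos rfl]; exact I.hcntU x hx0 hx
        · rw [if_neg hxv]; exact I.hcntU x hx0 hx
      · intro x hx; rw [hg x]
        by_cases hxv : x = v
        · subst hxv; rw [if_pos rfl]; exact I.hchU x hx
        · rw [if_neg hxv]; exact I.hchU x hx
      · intro i h
        have hne : (P ++ [u])[i] ≠ v := by
          intro he; exact hvP (he ▸ List.getElem_mem h)
        rw [hg (P ++ [u])[i], if_neg hne]
        exact I.hcntP i h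
      · intro i h v' hv'
        have hne : (P ++ [u])[i] ≠ v := by
          intro he; exact hvP (he ▸ List.getElem_mem h)
        rw [hg (P ++ [u])[i], if_neg hne] at hv'
        exact I.houtP i h v' hv'
      · have : ((P ++ [u]) ++ q ++ [v]).Nodup := by
          rw [List.nodup_append]
          refine ⟨I.hnd, List.nodup_singleton v, ?_⟩
          intro a ha b hb
          rw [List.mem_singleton] at hb
          subst hb
          exact fun he => hvfresh (he ▸ ha)
        simpa [List.append_assoc] using this
      · intro x hx
        rw [← List.append_assoc] at hx
        rcases List.mem_append.mp hx with hx | hx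
        · have := I.hmem x hx; simpa using this
        · simp at hx; subst hx
          refine ⟨by omega, by simpa using hvlt⟩
      · intro x hx
        rw [← List.append_assoc] at hx
        rcases List.mem_append.mp hx with hx | hx
        · exact I.hpar x hx
        · simp at hx; subst hx
          exact ⟨u, c, hvT, Or.inr (by simp)⟩
      · intro c' v' h
        rw [← List.append_assoc]
        exact List.mem_append_left _ (I.hroot c' v' h)
      · intro i h
        simp only [List.length_append, List.length_singleton] at h
        rcases Nat.lt_or_ge i q.length with hi | hi
        · have hidx : (q ++ [v])[i]'(by simp; omega) = q[i]'hi := List.getElem_append_left hi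
          rw [hidx, hfbg q[i], if_neg (by intro he; exact hvq (he ▸ List.getElem_mem hi))]
          rcases I.hqf i hi with h0 | hP | ⟨j, hj, hje⟩
          · exact Or.inl h0
          · exact Or.inr (Or.inl hP)
          · refine Or.inr (Or.inr ⟨j, by omega, ?_⟩)
            rw [List.getElem_append_left (by omega)]
            exact hje
        · have hieq : i = q.length := by omega
          subst hieq
          rw [List.getElem_concat_length rfl (by simp), hfbg v, if_pos rfl]
          rcases hw with h0 | hmem'
          · exact Or.inl h0
          · rcases List.mem_append.mp hmem' with hP | hq
            · exact Or.inr (Or.inl hP)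
            · obtain ⟨j, hj, hje⟩ := List.mem_iff_getElem.mp hq
              refine Or.inr (Or.inr ⟨j, by omega, ?_⟩)
              rw [List.getElem_append_left (by omega)]
              exact hje
      · intro g hg' c' hc' x hx
        have hgne : g ≠ v := by
          intro he; exact hvP (he ▸ List.mem_append_left _ hg')
        rw [hg g, if_neg hgne] at hx
        have := I.hPch g hg' c' hc' x hx
        rcases this with h0 | hm
        · exact Or.inl h0
        · exact Or.inr (by rw [← List.append_assoc]; exact List.mem_append_left _ hm)
      · rw [hfbg u, if_neg (fun he => hvne_u he.symm)]
        exact I.hufb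
      · intro c' hc'
        rw [hg u, if_neg (fun he => hvne_u he.symm)]
        exact I.hrem c' (List.mem_cons_of_mem _ hc')
      · intro c' hc1 hc2 x hx
        rw [hg u, if_neg (fun he => hvne_u he.symm)] at hx
        by_cases hcc : c' = c
        · subst hcc
          rw [hsc] at hx
          obtain rfl := Option.some.inj hx
          exact Or.inr (by rw [← List.append_assoc]; exact List.mem_append_right _ (by simp))
        · have := I.hdone c' (by simp [hc1, hcc]) hc2 x hx
          rcases this with h0 | hm
          · exact Or.inl h0
          · exact Or.inr (by rw [← List.append_assoc]; exact List.mem_append_left _ hm)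
      · intro c' hc' v' hv' hmem'
        have hvv : v' ≠ v := by
          intro he
          subst he
          have := hTi u c' u c v' hv' hvT
          rw [this.2] at hc'
          exact hccs hc'
        rw [← List.append_assoc] at hmem'
        rcases List.mem_append.mp hmem' with hm | hm
        · exact I.hfresh c' (List.mem_cons_of_mem _ hc') v' hv' hm
        · simp at hm; exact hvv hm
    | none =>
      have hscB : (getC cb u).get? c = none := by rw [← I.hch u]; exact hsc
      have hTnone : (getA T u).children.get? c = none := by
        rw [← I.hrem c (List.mem_cons_self ..)]; exact hsc
      set nd := { getA ns u with children := (getA ns u).children.insert c w } with hnd'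
      have hg : ∀ x, getA (ns.set u nd) x = if x = u then nd else getA ns x := by
        intro x
        by_cases hx : x = u
        · subst hx; rw [if_pos rfl]; exact getA_set_self ns x _ I.hult
        · rw [if_neg hx]; exact getA_set_ne ns u x _ hx
      have hcg : ∀ x, getC (cb.set u ((getC cb u).insert c w)) x =
          if x = u then (getC cb u).insert c w else getC cb x := by
        intro x
        by_cases hx : x = u
        · subst hx; rw [if_pos rfl, getC]
          exact gsetD_self cb x _ _ (by rw [I.hlen_cb]; exact I.hult)
        · rw [if_neg hx, getC, gsetD_ne _ _ _ _ _ hx]; rfl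
      have hstepA : procCharsA u (ns, q) (c :: cs) =
          procCharsA u (ns.set u nd, q) cs := by
        simp only [procCharsA, hsc, hfA, hnd', ← hw']
      have hstepB : procCharsB u (cb, fb, q) (c :: cs) =
          procCharsB u (cb.set u ((getC cb u).insert c w), fb, q) cs := by
        simp only [procCharsB, hscB, ← hf, hwB]
      rw [hstepA, hstepB]
      apply ih
      have huPu : u ∈ P ++ [u] := by simp
      refine ⟨by simpa using I.hlen_cb, by simpa using I.hlen_cnt,
        by simpa using I.hlen_fb, by simpa using I.hlen_T, by simpa using I.hpos,
        ?_, ?_, ?_, I.hcnt0, ?_, ?_, ?_, ?_, ?_, I.hnd, ?_, I.hpar, I.hroot, I.hqf, ?_,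
        (List.sublist_of_cons_sublist I.hsub), I.hupos, by simpa using I.hult, I.huP, I.hufb, ?_, ?_, ?_⟩
      · intro x; rw [hg x, hcg x]
        by_cases hx : x = u
        · subst hx; rw [if_pos rfl, if_pos rfl, hnd']
          show (getA ns x).children.insert c w = _
          rw [I.hch x]
        · rw [if_neg hx, if_neg hx]; exact I.hch x
      · intro x; rw [hg x]
        by_cases hx : x = u
        · subst hx; rw [if_pos rfl]; exact I.hfb x
        · rw [if_neg hx]; exact I.hfb x
      · intro x; rw [hg x]
        by_cases hx : x = u
        · subst hx; rw [if_pos rfl]; exact I.hpat x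
        · rw [if_neg hx]; exact I.hpat x
      · intro x hx; rw [hg x, if_neg (by intro he; subst he; exact hx huPu)]
        exact I.houtU x hx
      · intro x hx0 hx; rw [hg x, if_neg (by intro he; subst he; exact hx huPu)]
        exact I.hcntU x hx0 hx
      · intro x hx; rw [hg x, if_neg (by intro he; subst he; exact hx huPu)]
        exact I.hchU x hx
      · intro i h
        rw [hg (P ++ [u])[i]]
        by_cases hx : (P ++ [u])[i] = u
        · rw [if_pos hx]
          have := I.hcntP i h
          rw [hx] at this ⊢
          exact this
        · rw [if_neg hx]; exact I.hcntP i h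
      · intro i h v' hv'
        rw [hg (P ++ [u])[i]] at hv'
        by_cases hx : (P ++ [u])[i] = u
        · rw [if_pos hx] at hv'
          have : (getA ns (P ++ [u])[i]).output = some v' := by rw [hx]; exact hv'
          exact I.houtP i h v' this
        · rw [if_neg hx] at hv'; exact I.houtP i h v' hv'
      · intro x hx; have := I.hmem x hx; simpa using this
      · intro g hg' c' hc' x hx
        have hgne : g ≠ u := fun he => I.huP (he ▸ hg')
        rw [hg g, if_neg hgne] at hx
        exact I.hPch g hg' c' hc' x hx
      · intro c' hc'
        rw [hg u, if_pos rfl, hnd']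
        show ((getA ns u).children.insert c w).get? c' = _
        rw [PySem.Dict.get?_insert_of_ne _ _ (by intro he; subst he; exact hccs hc'),
          I.hrem c' (List.mem_cons_of_mem _ hc')]
      · intro c' hc1 hc2 x hx
        rw [hg u, if_pos rfl] at hx
        have hx' : ((getA ns u).children.insert c w).get? c' = some x := hx
        by_cases hcc : c' = c
        · subst hcc
          rw [PySem.Dict.get?_insert_self] at hx'
          obtain rfl := Option.some.inj hx'
          exact hw
        · rw [PySem.Dict.get?_insert_of_ne _ _ hcc] at hx'
          exact I.hdone c' (by simp [hc1, hcc]) hc2 x hx'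
      · intro c' hc' v' hv'
        exact I.hfresh c' (List.mem_cons_of_mem _ hc') v' hv'


theorem loop_end (T ns : List NodeA) (cb : List (PySem.Dict Char Nat)) (cnt : List Int)
    (fb : List Nat) (P q : List Nat) (u : Nat)
    (I : LoopInv T u P ns cb cnt fb q []) : BfsInv T ns cb cnt fb (P ++ [u]) q := by
  refine ⟨I.hlen_cb, I.hlen_cnt, I.hlen_fb, I.hlen_T, I.hpos, I.hch, I.hfb, I.hpat, I.hcnt0,
    I.houtU, I.hcntU, I.hchU, I.hcntP, I.houtP, I.hnd, I.hmem, ?_, I.hroot, I.hqf, ?_⟩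
  · intro w hw
    obtain ⟨p, c, he, hp⟩ := I.hpar w hw
    exact ⟨p, c, he, hp⟩
  · intro g hg c hc x hx
    rcases List.mem_append.mp hg with hgP | hgu
    · exact I.hPch g hgP c hc x hx
    · rw [List.mem_singleton] at hgu
      subst hgu
      exact I.hdone c (by simp) hc x hx

theorem bfs_master (T : List NodeA)
    (hTe : ∀ w c v, (getA T w).children.get? c = some v → w < v ∧ v < T.length)
    (hTi : ∀ w c w' c' v, (getA T w).children.get? c = some v →
      (getA T w').children.get? c' = some v → w = w' ∧ c = c') :
    ∀ (fuel : Nat) (q P : List Nat) (ns : List NodeA) (cb : List (PySem.Dict Char Nat))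
      (cnt : List Int) (fb : List Nat), BfsInv T ns cb cnt fb P q →
    ∃ P' q' fb', BfsInv T (bfsA fuel q ns) (bfsB fuel q (cb, cnt, fb)).1
      (bfsB fuel q (cb, cnt, fb)).2 fb' P' q' := by
  intro fuel
  induction fuel with
  | zero => intro q P ns cb cnt fb I; exact ⟨P, q, fb, I⟩
  | succ fuel ih =>
    intro q P ns cb cnt fb I
    cases q with
    | nil => exact ⟨P, [], fb, I⟩
    | cons u q =>
      have hfueq : ((getA ns u).fail).getD 0 = fb.getD u 0 := (I.hfb u).symm
      have L0 := loop_init T ns cb cnt fb P u q hTi I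
      have L1 := loop_run T u P hTe hTi azChars _ cb (cnt.set u (cnt.getD u 0 + cnt.getD (fb.getD u 0) 0)) fb q L0
      have hstepA : bfsA (fuel + 1) (u :: q) ns = bfsA fuel
          (procCharsA u (ns.set u { getA ns u with output :=
            (if (getA ns (fb.getD u 0)).patterns ≠ [] then some (fb.getD u 0)
              else (getA ns (fb.getD u 0)).output) }, q) azChars).2
          (procCharsA u (ns.set u { getA ns u with output :=
            (if (getA ns (fb.getD u 0)).patterns ≠ [] then some (fb.getD u 0)
              else (getA ns (fb.getD u 0)).output) }, q) azChars).1 := by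
        simp only [bfsA, hfueq]
      have hstepB : bfsB (fuel + 1) (u :: q) (cb, cnt, fb) = bfsB fuel
          (procCharsB u (cb, fb, q) azChars).2.2
          ((procCharsB u (cb, fb, q) azChars).1,
            cnt.set u (cnt.getD u 0 + cnt.getD (fb.getD u 0) 0),
            (procCharsB u (cb, fb, q) azChars).2.1) := by
        simp only [bfsB]
      rw [hstepA, hstepB]
      rw [← L1.1]
      exact ih _ _ _ _ _ _ (loop_end T _ _ _ _ _ _ _ L1.2)

theorem chainA_none (ns : List NodeA) : ∀ (fuel : Nat) (acc : Int),
    chainA ns fuel none acc = acc := by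
  intro fuel acc
  cases fuel <;> rfl

theorem chain_eq (T ns : List NodeA) (cb : List (PySem.Dict Char Nat)) (cnt : List Int)
    (fb : List Nat) (P q : List Nat) (I : BfsInv T ns cb cnt fb P q) :
    ∀ u, chainA ns (ns.length + 1) (some u) 0 = cnt.getD u 0 := by
  have aux1 : ∀ w, w ∉ P → ∀ (fuel : Nat) (acc : Int),
      chainA ns (fuel + 1) (some w) acc = acc + cnt.getD w 0 := by
    intro w hw fuel acc
    by_cases hw0 : w = 0
    · subst hw0
      show chainA ns (fuel + 1) (some 0) acc = acc + cnt.getD 0 0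
      rw [I.hcnt0]
      simp [chainA]
    · have hout := I.houtU w hw
      show chainA ns (fuel + 1) (some w) acc = _
      rw [chainA, if_neg hw0, hout, chainA_none, I.hcntU w (by omega) hw]
  have aux2 : ∀ i, ∀ (h : i < P.length), ∀ (fuel : Nat) (acc : Int), i + 2 ≤ fuel →
      chainA ns fuel (some P[i]) acc = acc + cnt.getD P[i] 0 := by
    intro i
    induction i using Nat.strong_induction_on with
    | _ i IH =>
      intro h fuel acc hfuel
      obtain ⟨k, rfl⟩ : ∃ k, fuel = k + 1 := ⟨fuel - 1, by omega⟩
      have hne : P[i] ≠ 0 := by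
        have := I.hmem P[i] (List.mem_append_left _ (List.getElem_mem h))
        omega
      rw [chainA, if_neg hne]
      have hcp := I.hcntP i h
      cases hov : (getA ns P[i]).output with
      | none =>
        rw [chainA_none]
        rw [hov] at hcp
        have hcp' : cnt.getD P[i] 0 = ((getA ns P[i]).patterns.length : Int) + 0 := hcp
        rw [hcp']
        ring
      | some v =>
        rw [hov] at hcp
        have hcp' : cnt.getD P[i] 0 = ((getA ns P[i]).patterns.length : Int) +
            cnt.getD v 0 := hcp
        rcases I.houtP i h v hov with h0 | ⟨j, hj, hje⟩
        · subst h0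
          have hz : chainA ns k (some 0) (acc + ((getA ns P[i]).patterns.length : Int)) =
              acc + ((getA ns P[i]).patterns.length : Int) := by
            obtain ⟨m, rfl⟩ : ∃ m, k = m + 1 := ⟨k - 1, by omega⟩
            simp [chainA]
          rw [hz, hcp', I.hcnt0]
          ring
        · subst hje
          rw [IH j (by omega) (by omega) k _ (by omega), hcp']
          ring
  intro u
  by_cases hu : u ∈ P
  · obtain ⟨i, hi, rfl⟩ := List.mem_iff_getElem.mp hu
    have hPnd : P.Nodup := ((List.nodup_append.mp I.hnd).1)
    have hPlen : P.length + 1 ≤ ns.length := by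
      refine nodup_len_le P ns.length hPnd ?_ I.hpos
      intro x hx; exact I.hmem x (List.mem_append_left _ hx)
    have := aux2 i hi (ns.length + 1) 0 (by omega)
    rw [this]; ring
  · have := aux1 u hu ns.length 0
    rw [this]; ring

theorem fold_eq (nsF : List NodeA) (cbF : List (PySem.Dict Char Nat)) (cntF : List Int)
    (hch : ∀ w, (getA nsF w).children = getC cbF w)
    (hcnt : ∀ w, chainA nsF (nsF.length + 1) (some w) 0 = cntF.getD w 0) :
    ∀ (l : List Char) (s : Nat) (acc : Int),
    (l.foldl (fun (st : Nat × Int) c =>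
       (((getA nsF st.1).children.getD c 0),
         st.2 + chainA nsF (nsF.length + 1) (some ((getA nsF st.1).children.getD c 0)) 0))
      (s, acc)) =
    (l.foldl (fun (st : Nat × Int) c =>
       (((getC cbF st.1).getD c 0), st.2 + cntF.getD ((getC cbF st.1).getD c 0) 0))
      (s, acc)) := by
  intro l
  induction l with
  | nil => intro s acc; rfl
  | cons c cs ihl =>
    intro s acc
    simp only [List.foldl_cons]
    rw [hch s, hcnt ((getC cbF s).getD c 0)]
    exact ihl _ _

-- ===== VERDICT (by name: the statement is the Claim_ definition above) =====
theorem solve_counting_spec : Claim_equal_solve_counting := by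
  intro text patterns _
  show solve_counting text patterns = solve_counting_alt text patterns
  simp only [solve_counting, solve_counting_alt]
  have hTI := buildTrie_inv patterns
  have hTe : ∀ w c v, (getA (buildTrieA patterns) w).children.get? c = some v →
      w < v ∧ v < (buildTrieA patterns).length := fun w c v h => hTI.hedge w c v h
  have hTi := hTI.hinj
  obtain ⟨I0, hq⟩ := init_establish patterns
  have hfuel : (buildTrieB patterns).1.length = (initA (buildTrieA patterns)).1.length :=
    I0.hlen_cb
  rw [← hq, hfuel]
  rw [hfuel] at I0
  obtain ⟨P', q', fb', If⟩ := bfs_master (buildTrieA patterns) hTe hTi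
    (initA (buildTrieA patterns)).1.length (initA (buildTrieA patterns)).2 []
    (initA (buildTrieA patterns)).1 (buildTrieB patterns).1 (buildTrieB patterns).2
    (List.replicate (initA (buildTrieA patterns)).1.length 0) I0
  have := fold_eq _ _ _ If.hch (chain_eq _ _ _ _ _ _ _ If) text.toList 0 0
  rw [this]
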